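-- pv_equiv track=rewrite | github.com/miosync-masa/Lambda_inverse_problem | labo/lambda3_residue_focus.py | _create_residue_mapping
-- ===== SOURCE A (Python) =====
-- from typing import Dict, List, Tuple, Optional, Any, TYPE_CHECKING
--
-- def _create_residue_mapping(n_atoms: int, n_residues: int) -> Dict[int, List[int]]:
--     """Create mapping from residue ID to atom indices"""
--     atoms_per_residue = n_atoms // n_residues
--     residue_atoms = {}
--
--     for res_id in range(n_residues):
--         start_atom = res_id * atoms_per_residue
--         end_atom = min(start_atom + atoms_per_residue, n_atoms)
--         residue_atoms[res_id] = list(range(start_atom, end_atom))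
--
--     # Handle remaining atoms
--     if n_atoms % n_residues != 0:
--         remaining_start = n_residues * atoms_per_residue
--         residue_atoms[n_residues-1].extend(range(remaining_start, n_atoms))
--
--     return residue_atoms
-- ===== SOURCE B (Python) =====
-- def _create_residue_mapping(n_atoms: int, n_residues: int):
--     """Create mapping from residue ID to atom indices (single pass over atoms)."""
--     k = n_atoms // n_residues
--     buckets = {r: [] for r in range(n_residues)}
--     for i in range(n_atoms):
--         r = n_residues - 1 if k == 0 else min(i // k, n_residues - 1)
--         buckets[r].append(i)
--     return buckets
-- ===== Notes on version B (the rewrite author's own statement) =====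
-- stated objective: alternative
-- what changed: Replaces the per-residue loop that builds index ranges (plus a remainder-extend patch) by a single pass over atom indices that appends each atom i to bucket min(i // k, n_residues-1), with the k==0 case sending every atom to the last bucket.
-- outside the precondition, e.g. on _create_residue_mapping(-3, 2): A returns {0: [], 1: [-4]}, B returns {0: [], 1: []}; on _create_residue_mapping(4, -2): A returns {}, B raises KeyError
import Mathlib
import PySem

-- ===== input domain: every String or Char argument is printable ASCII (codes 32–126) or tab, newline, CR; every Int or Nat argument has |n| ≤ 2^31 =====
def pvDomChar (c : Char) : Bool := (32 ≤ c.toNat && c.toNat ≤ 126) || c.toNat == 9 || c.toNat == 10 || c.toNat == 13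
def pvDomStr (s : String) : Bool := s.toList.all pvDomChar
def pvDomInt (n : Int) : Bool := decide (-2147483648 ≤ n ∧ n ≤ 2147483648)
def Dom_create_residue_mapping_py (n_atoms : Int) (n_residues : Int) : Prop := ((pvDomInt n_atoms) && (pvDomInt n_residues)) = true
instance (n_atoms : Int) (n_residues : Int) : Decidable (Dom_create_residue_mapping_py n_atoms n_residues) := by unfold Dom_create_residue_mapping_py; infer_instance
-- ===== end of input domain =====

-- B replaces A's per-residue range construction (plus remainder-extend patch) by a single
-- pass over atom indices appending each atom to its bucket; alternative decomposition, same cost.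


-- ===== PORT A =====
def create_residue_mapping_py (n_atoms : Int) (n_residues : Int) : List (Int × List Int) :=
  let atoms_per_residue := PySem.Int.floordiv n_atoms n_residues
  let residue_atoms : PySem.Dict Int (List Int) :=
    (PySem.List.pyRange 0 n_residues 1).foldl
      (fun d res_id =>
        let start_atom := res_id * atoms_per_residue
        let end_atom := min (start_atom + atoms_per_residue) n_atoms
        d.insert res_id (PySem.List.pyRange start_atom end_atom 1))
      PySem.Dict.empty
  let residue_atoms :=
    if PySem.Int.mod n_atoms n_residues ≠ 0 then
      -- Python mutates residue_atoms[n_residues-1] in place (KeyError if the key is absent — excluded by Pre_)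
      residue_atoms.modify (n_residues - 1) []
        (fun l => l ++ PySem.List.pyRange (n_residues * atoms_per_residue) n_atoms 1)
    else residue_atoms
  residue_atoms.items

-- ===== PORT B =====
def create_residue_mapping_py_alt (n_atoms : Int) (n_residues : Int) : List (Int × List Int) :=
  let k := PySem.Int.floordiv n_atoms n_residues
  let buckets : PySem.Dict Int (List Int) :=
    (PySem.List.pyRange 0 n_residues 1).foldl
      (fun d r => d.insert r ([] : List Int)) PySem.Dict.empty
  let buckets :=
    (PySem.List.pyRange 0 n_atoms 1).foldl
      (fun d i =>
        let r := if k = 0 then n_residues - 1 else min (PySem.Int.floordiv i k) (n_residues - 1)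
        -- Python appends to buckets[r] in place (KeyError if absent — never happens under Pre_)
        d.modify r [] (fun l => l ++ [i]))
      buckets
  buckets.items

-- ===== PRECONDITION & SPEC =====
-- Pre_ excludes n_residues ≤ 0 (A raises ZeroDivisionError at 0 and KeyError for most negative
-- counts, and its {} return for a divisible negative count is an artefact B need not match) and
-- n_atoms < 0, where A's remainder-extend path returns accidental negative atom indices.
def Pre_create_residue_mapping_py (n_atoms : Int) (n_residues : Int) : Prop :=
  0 ≤ n_atoms ∧ 1 ≤ n_residues
instance (n_atoms : Int) (n_residues : Int) : Decidable (Pre_create_residue_mapping_py n_atoms n_residues) := by unfold Pre_create_residue_mapping_py; infer_instance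
def pvWitness_create_residue_mapping_py : Int × Int := (7, 3)

def Spec_create_residue_mapping_py (n_atoms : Int) (n_residues : Int) (out : List (Int × List Int)) : Prop := out = create_residue_mapping_py_alt n_atoms n_residues
instance (n_atoms : Int) (n_residues : Int) (out : List (Int × List Int)) : Decidable (Spec_create_residue_mapping_py n_atoms n_residues out) := by unfold Spec_create_residue_mapping_py; infer_instance

-- ===== CLAIM (what is proved, stated in full; the proofs are below) =====
def Claim_equal_create_residue_mapping_py : Prop := ∀ (n_atoms : Int) (n_residues : Int), Dom_create_residue_mapping_py n_atoms n_residues → Pre_create_residue_mapping_py n_atoms n_residues → Spec_create_residue_mapping_py n_atoms n_residues (create_residue_mapping_py n_atoms n_residues)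

-- ===== LEMMAS AND PROOFS =====

def aBucket (n_atoms n_residues r : Int) : List Int :=
  let k := PySem.Int.floordiv n_atoms n_residues
  (PySem.List.pyRange (r * k) (min (r * k + k) n_atoms) 1) ++
    (if PySem.Int.mod n_atoms n_residues ≠ 0 ∧ r = n_residues - 1
     then PySem.List.pyRange (n_residues * k) n_atoms 1 else [])

theorem portA_eq (na nr : Int) (h : 1 ≤ nr) :
    create_residue_mapping_py na nr
      = (PySem.List.pyRange 0 nr 1).map (fun r => (r, aBucket na nr r)) := by
  simp only [create_residue_mapping_py]
  set k := PySem.Int.floordiv na nr with hk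
  set R := PySem.List.pyRange 0 nr 1 with hR
  set v : Int → List Int := fun r => PySem.List.pyRange (r*k) (min (r*k+k) na) 1 with hv
  set dA := R.foldl (fun d res_id => d.insert res_id (v res_id)) PySem.Dict.empty with hdA
  have hnodupR : R.Nodup := PySem.List.nodup_pyRange_one 0 nr
  have hkeysA : dA.keys = R := by
    rw [hdA, PySem.Dict.keys_foldl_insert R (fun _ x => v x) PySem.Dict.empty]
    simp [PySem.Set.update_nil_left, PySem.Set.ofList_eq_self_of_nodup R hnodupR]
  have hitemsA : dA.items = R.map (fun r => (r, v r)) := by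
    have := PySem.Dict.items_foldl_insert_fresh R (fun a => a) v PySem.Dict.empty
      (by intro a _; simp) (by simpa using hnodupR)
    simpa using this
  have hgetA : ∀ r ∈ R, dA.getD r [] = v r := by
    intro r hr
    exact PySem.Dict.getD_of_mem_items dA (by rw [hitemsA]; exact List.mem_map_of_mem hr)
      (by rw [hkeysA]; exact hnodupR) []
  have hlast : nr - 1 ∈ R := by rw [hR, PySem.List.mem_pyRange_one]; omega
  by_cases hrem : PySem.Int.mod na nr ≠ 0
  · rw [if_pos hrem]
    set g : List Int → List Int := fun l => l ++ PySem.List.pyRange (nr * k) na 1 with hg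
    set dA' := dA.modify (nr - 1) [] g with hdA'
    have hkeys' : dA'.keys = R := by
      rw [hdA', PySem.Dict.keys_modify, PySem.Dict.keys_insert_of_contains, hkeysA]
      rw [PySem.Dict.contains_iff_mem_keys, hkeysA]; exact hlast
    rw [PySem.Dict.items_eq_map_keys dA' (by rw [hkeys']; exact hnodupR) [], hkeys']
    refine List.map_congr_left (fun r hr => ?_)
    have : dA'.getD r [] = if r = nr - 1 then g (dA.getD (nr-1) []) else dA.getD r [] := by
      rw [hdA', PySem.Dict.getD_modify]
    rw [this]
    by_cases hre : r = nr - 1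
    · simp only [hre, if_pos, hgetA _ hlast, aBucket]
      simp [hg, hv, hk, hrem]
    · simp only [hre, ite_false, hgetA _ hr, aBucket]
      simp only [and_false, ite_false, List.append_nil]
      rfl
  · rw [if_neg hrem]
    rw [hitemsA]
    refine List.map_congr_left (fun r hr => ?_)
    rw [not_not] at hrem
    simp only [aBucket, hrem, ne_eq, not_true_eq_false, false_and, ite_false, List.append_nil, hv]
    rfl

def bKey (n_atoms n_residues i : Int) : Int :=
  let k := PySem.Int.floordiv n_atoms n_residues
  if k = 0 then n_residues - 1 else min (PySem.Int.floordiv i k) (n_residues - 1)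

def bBucket (n_atoms n_residues r : Int) : List Int :=
  (PySem.List.pyRange 0 n_atoms 1).filter (fun i => bKey n_atoms n_residues i == r)

theorem bKey_mem (na nr i : Int) (hna : 0 ≤ na) (h0 : 0 ≤ i) (h : 1 ≤ nr) :
    0 ≤ bKey na nr i ∧ bKey na nr i < nr := by
  unfold bKey
  have hknn : 0 ≤ PySem.Int.floordiv na nr :=
    (PySem.Int.le_floordiv_iff_mul_le (by omega)).mpr (by omega)
  by_cases hk : PySem.Int.floordiv na nr = 0
  · simp only [hk, if_pos]; omega
  · simp only [hk, ite_false]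
    have : 0 ≤ PySem.Int.floordiv i (PySem.Int.floordiv na nr) :=
      (PySem.Int.le_floordiv_iff_mul_le (by omega)).mpr (by omega)
    constructor
    · exact le_min this (by omega)
    · have := min_le_right (PySem.Int.floordiv i (PySem.Int.floordiv na nr)) (nr - 1)
      omega

theorem portB_eq (na nr : Int) (h0 : 0 ≤ na) (h : 1 ≤ nr) :
    create_residue_mapping_py_alt na nr
      = (PySem.List.pyRange 0 nr 1).map (fun r => (r, bBucket na nr r)) := by
  simp only [create_residue_mapping_py_alt]
  set k := PySem.Int.floordiv na nr with hk
  set R := PySem.List.pyRange 0 nr 1 with hR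
  set A := PySem.List.pyRange 0 na 1 with hA
  have hnodupR : R.Nodup := PySem.List.nodup_pyRange_one 0 nr
  set d0 := R.foldl (fun d r => d.insert r ([] : List Int)) PySem.Dict.empty with hd0
  have hkeys0 : d0.keys = R := by
    rw [hd0, PySem.Dict.keys_foldl_insert R (fun _ _ => ([] : List Int)) PySem.Dict.empty]
    simp [PySem.Set.update_nil_left, PySem.Set.ofList_eq_self_of_nodup R hnodupR]
  have hitems0 : d0.items = R.map (fun r => (r, ([] : List Int))) := by
    have := PySem.Dict.items_foldl_insert_fresh R (fun a => a) (fun _ => ([] : List Int)) PySem.Dict.empty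
      (by intro a _; simp) (by simpa using hnodupR)
    simpa using this
  have hget0 : ∀ r ∈ R, d0.getD r [] = [] := by
    intro r hr
    exact PySem.Dict.getD_of_mem_items d0 (by rw [hitems0]; exact List.mem_map_of_mem hr)
      (by rw [hkeys0]; exact hnodupR) []
  set d1 := A.foldl (fun d i => d.modify (if k = 0 then nr - 1 else min (PySem.Int.floordiv i k) (nr - 1)) [] (fun l => l ++ [i])) d0 with hd1
  have hbkey : ∀ i : Int, (if k = 0 then nr - 1 else min (PySem.Int.floordiv i k) (nr - 1)) = bKey na nr i := by
    intro i; rw [bKey, hk]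
  have hd1' : d1 = (A.map (fun i => (bKey na nr i, i))).foldl
      (fun d p => d.modify p.1 [] (fun l => l ++ [p.2])) d0 := by
    rw [List.foldl_map, hd1]
    simp only [hbkey]
  have hkeys1 : d1.keys = R := by
    rw [hd1', PySem.Dict.keys_foldl_modify_key (A.map (fun i => (bKey na nr i, i)))
      (fun p => p.1) ([] : List Int) (fun _ p => (fun l => l ++ [p.2])) d0,
      hkeys0, PySem.Set.update_eq_append_filter]
    have : (PySem.Set.ofList ((A.map (fun i => (bKey na nr i, i))).map (fun p => p.1))).filter
        (fun y => !PySem.Set.contains R y) = [] := by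
      rw [List.filter_eq_nil_iff]
      intro y hy
      rw [PySem.Set.mem_ofList, List.map_map, List.mem_map] at hy
      obtain ⟨i, hi, hyi⟩ := hy
      rw [hA, PySem.List.mem_pyRange_one] at hi
      have := bKey_mem na nr i h0 hi.1 h
      have hyR : y ∈ R := by
        rw [hR, PySem.List.mem_pyRange_one]; simp only [Function.comp] at hyi; omega
      simpa using hyR
    rw [this, List.append_nil]
  have hget1 : ∀ r ∈ R, d1.getD r [] = bBucket na nr r := by
    intro r hr
    rw [hd1', PySem.Dict.getD_foldl_modify_append, hget0 r hr, List.nil_append]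
    rw [bBucket, List.filter_map, ← hA]
    simp [List.map_map, Function.comp_def]
  rw [PySem.Dict.items_eq_map_keys d1 (by rw [hkeys1]; exact hnodupR) [], hkeys1]
  exact List.map_congr_left (fun r hr => by rw [hget1 r hr])

theorem buckets_eq (na nr r : Int) (h0 : 0 ≤ na) (h : 1 ≤ nr)
    (hr0 : 0 ≤ r) (hr : r < nr) :
    aBucket na nr r = bBucket na nr r := by
  have hid := PySem.Int.floordiv_mul_add_mod na nr
  have hm0 := PySem.Int.mod_nonneg na (show (0:Int) < nr by omega)
  have hmlt := PySem.Int.mod_lt na (show (0:Int) < nr by omega)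
  unfold aBucket bBucket bKey
  set k := PySem.Int.floordiv na nr with hk
  set m := PySem.Int.mod na nr with hm
  have hknn : 0 ≤ k := by
    rw [hk]; exact (PySem.Int.le_floordiv_iff_mul_le (by omega)).mpr (by omega)
  by_cases hk0 : k = 0
  · -- n_atoms < n_residues: every atom lands in the last bucket
    have hna : na = m := by rw [← hid, hk0]; ring
    simp only [hk0, if_pos, mul_zero, add_zero]
    rw [min_eq_left h0, PySem.List.pyRange_one_eq_nil (le_refl 0), List.nil_append]
    by_cases hlast : r = nr - 1
    · have hfil : (PySem.List.pyRange 0 na 1).filter (fun i => nr - 1 == r) = PySem.List.pyRange 0 na 1 := by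
        rw [List.filter_eq_self]
        intro a _
        simp [hlast]
      rw [hfil]
      by_cases hm00 : m = 0
      · simp only [hm00, ne_eq, not_true_eq_false, false_and, ite_false]
        rw [PySem.List.pyRange_one_eq_nil (by omega)]
      · simp [hm00, hlast]
    · have hfil : (PySem.List.pyRange 0 na 1).filter (fun i => nr - 1 == r) = [] := by
        rw [List.filter_eq_nil_iff]
        intro a _
        simp only [beq_iff_eq]
        omega
      rw [hfil]
      simp [hlast]
  · -- k ≥ 1
    have hk1 : 1 ≤ k := by omega
    have hco : nr * k = k * nr := mul_comm nr k
    have hnrk : nr * k ≤ na := by rw [hco]; omega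
    simp only [hk0, ite_false]
    by_cases hlast : r = nr - 1
    · subst hlast
      have e1 : (nr - 1) * k + k = nr * k := by ring
      have hle1 : (nr - 1) * k ≤ nr * k := mul_le_mul_of_nonneg_right (by omega) hknn
      have hle0 : 0 ≤ (nr - 1) * k := mul_nonneg (by omega) hknn
      rw [e1, min_eq_left hnrk]
      have hsplit := PySem.List.pyRange_one_append 0 ((nr-1)*k) na hle0 (by omega)
      rw [hsplit, List.filter_append]
      have hfil1 : (PySem.List.pyRange 0 ((nr-1)*k) 1).filter
          (fun i => min (PySem.Int.floordiv i k) (nr - 1) == nr - 1) = [] := by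
        rw [List.filter_eq_nil_iff]
        intro i hi
        rw [PySem.List.mem_pyRange_one] at hi
        have hdl : PySem.Int.floordiv i k < nr - 1 :=
          (PySem.Int.floordiv_lt_iff_lt_mul (by omega)).mpr (by omega)
        have := min_le_left (PySem.Int.floordiv i k) (nr - 1)
        simp only [beq_iff_eq]
        omega
      have hfil2 : (PySem.List.pyRange ((nr-1)*k) na 1).filter
          (fun i => min (PySem.Int.floordiv i k) (nr - 1) == nr - 1) = PySem.List.pyRange ((nr-1)*k) na 1 := by
        rw [List.filter_eq_self]
        intro i hi
        rw [PySem.List.mem_pyRange_one] at hi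
        have hdl : nr - 1 ≤ PySem.Int.floordiv i k :=
          (PySem.Int.le_floordiv_iff_mul_le (by omega)).mpr (by omega)
        simp only [beq_iff_eq]
        omega
      rw [hfil1, hfil2, List.nil_append]
      by_cases hm00 : m = 0
      · have : na = nr * k := by omega
        simp only [hm00, ne_eq, not_true_eq_false, false_and, ite_false, List.append_nil]
        rw [this]
      · rw [if_pos (by exact ⟨hm00, rfl⟩)]
        exact (PySem.List.pyRange_one_append ((nr-1)*k) (nr*k) na hle1 hnrk).symm
    · -- interior residue: exact block of k atoms
      have hrle : r + 1 ≤ nr - 1 := by omega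
      have e1 : r * k + k = (r + 1) * k := by ring
      have hle1 : (r + 1) * k ≤ (nr - 1) * k := mul_le_mul_of_nonneg_right (by omega) hknn
      have hle2 : (nr - 1) * k ≤ nr * k := mul_le_mul_of_nonneg_right (by omega) hknn
      have hle0 : 0 ≤ r * k := mul_nonneg hr0 hknn
      have hlek : r * k ≤ (r + 1) * k := mul_le_mul_of_nonneg_right (by omega) hknn
      have hmin : min (r * k + k) na = r * k + k := min_eq_left (by omega)
      rw [hmin]
      rw [if_neg (by simp [hlast])]
      rw [List.append_nil]
      have hsplit1 := PySem.List.pyRange_one_append 0 (r*k) na hle0 (by omega)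
      have hsplit2 := PySem.List.pyRange_one_append (r*k) (r*k+k) na (by omega) (by omega)
      rw [hsplit1, hsplit2, List.filter_append, List.filter_append]
      have hfil1 : (PySem.List.pyRange 0 (r*k) 1).filter
          (fun i => min (PySem.Int.floordiv i k) (nr - 1) == r) = [] := by
        rw [List.filter_eq_nil_iff]
        intro i hi
        rw [PySem.List.mem_pyRange_one] at hi
        have hdl : PySem.Int.floordiv i k < r :=
          (PySem.Int.floordiv_lt_iff_lt_mul (by omega)).mpr (by omega)
        have := min_le_left (PySem.Int.floordiv i k) (nr - 1)
        simp only [beq_iff_eq]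
        omega
      have hfil2 : (PySem.List.pyRange (r*k) (r*k+k) 1).filter
          (fun i => min (PySem.Int.floordiv i k) (nr - 1) == r) = PySem.List.pyRange (r*k) (r*k+k) 1 := by
        rw [List.filter_eq_self]
        intro i hi
        rw [PySem.List.mem_pyRange_one] at hi
        have hdq : PySem.Int.floordiv i k = r :=
          (PySem.Int.floordiv_eq_iff_of_pos (by omega)).mpr ⟨by omega, by omega⟩
        simp only [beq_iff_eq, hdq]
        omega
      have hfil3 : (PySem.List.pyRange (r*k+k) na 1).filter
          (fun i => min (PySem.Int.floordiv i k) (nr - 1) == r) = [] := by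
        rw [List.filter_eq_nil_iff]
        intro i hi
        rw [PySem.List.mem_pyRange_one] at hi
        have hdl : r + 1 ≤ PySem.Int.floordiv i k :=
          (PySem.Int.le_floordiv_iff_mul_le (by omega)).mpr (by omega)
        simp only [beq_iff_eq]
        omega
      rw [hfil1, hfil2, hfil3, List.nil_append, List.append_nil]

-- ===== VERDICT (by name: the statement is the Claim_ definition above) =====
theorem create_residue_mapping_py_spec : Claim_equal_create_residue_mapping_py := by
  intro na nr _ hpre
  obtain ⟨h0, h1⟩ := hpre
  show create_residue_mapping_py na nr = create_residue_mapping_py_alt na nr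
  rw [portA_eq na nr h1, portB_eq na nr h0 h1]
  refine List.map_congr_left (fun r hrmem => ?_)
  rw [PySem.List.mem_pyRange_one] at hrmem
  exact congrArg _ (buckets_eq na nr r h0 h1 hrmem.1 hrmem.2)
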